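-- pv_equiv track=rewrite | github.com/201710757/cpp_study | kaka_test2/test4.py | f
-- ===== SOURCE A (Python) =====
-- from itertools import combinations_with_replacement
--
-- def f(n, r):
--     res = []
--     lst = [x for x in range(n)]
--
--     for cwr in combinations_with_replacement(lst, r):
--         tmp = [0 for _ in range(11)]
--         for idx in cwr:
--             tmp[idx] += 1
--         res.append(tmp)
--     return res
-- ===== SOURCE B (Python) =====
-- def f(n, r):
--     # stars-and-bars: enumerate count vectors directly, choosing the count c of
--     # each value i from rem down to 0 (matching combinations_with_replacement's
--     # lexicographic order); only a positive count is written into the vector.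
--     def go(i, rem, vec):
--         if rem == 0:
--             return [vec]
--         if i >= n:
--             return []
--         out = []
--         for c in range(rem, -1, -1):
--             out.extend(go(i + 1, rem - c,
--                           vec[:i] + [c] + vec[i + 1:] if c > 0 else vec))
--         return out
--     return go(0, r, [0] * 11)
-- ===== Notes on version B (the rewrite author's own statement) =====
-- stated objective: alternative
-- what changed: Replaces itertools.combinations_with_replacement plus per-tuple counting with a direct stars-and-bars recursion that enumerates the count vectors themselves, choosing each value's multiplicity from the remaining total downward.
-- outside the precondition, e.g. on f(2, -1): A raises ValueError, B returns []; on f(12, 1): A raises IndexError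
import Mathlib
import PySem

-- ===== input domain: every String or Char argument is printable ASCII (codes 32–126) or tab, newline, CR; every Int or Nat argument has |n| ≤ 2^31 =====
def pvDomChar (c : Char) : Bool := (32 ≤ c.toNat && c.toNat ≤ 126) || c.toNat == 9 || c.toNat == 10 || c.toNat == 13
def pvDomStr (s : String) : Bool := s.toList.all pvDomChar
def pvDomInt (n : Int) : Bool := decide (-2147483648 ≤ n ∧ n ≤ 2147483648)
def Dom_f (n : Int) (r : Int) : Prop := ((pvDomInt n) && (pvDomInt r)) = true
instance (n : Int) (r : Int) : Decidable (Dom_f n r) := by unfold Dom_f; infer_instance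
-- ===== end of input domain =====

-- B replaces itertools.combinations_with_replacement by a direct stars-and-bars
-- recursion over count vectors (objective: alternative decomposition, same output order).

-- ===== PORT A =====
-- itertools.combinations_with_replacement, transliterated: tuples in lexicographic
-- order; first all tuples starting with the head, then those from the tail.
def cwr (xs : List Int) (k : Nat) : List (List Int) :=
  match k, xs with
  | 0, _ => [[]]
  | _ + 1, [] => []
  | k + 1, x :: rest => (cwr (x :: rest) k).map (fun t => x :: t) ++ cwr rest (k + 1)
termination_by (k, xs.length)

-- tmp[idx] += 1 (idx is drawn from range(n), hence nonnegative and, inside Pre_, < 11)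
def incAt (l : List Int) (idx : Int) : List Int := l.modify idx.toNat (· + 1)

def f (n : Int) (r : Int) : List (List Int) :=
  let lst := PySem.List.pyRange 0 n 1
  (cwr lst r.toNat).map (fun c => c.foldl incAt (List.replicate 11 0))

-- ===== PORT B =====
-- vec[:i] + [c] + vec[i+1:] (i counts up from 0, so the slices are take/drop)
def go (n : Int) (i : Int) (rem : Int) (vec : List Int) : List (List Int) :=
  if rem = 0 then [vec]
  else if n ≤ i then []
  else (PySem.List.pyRange rem (-1) (-1)).flatMap (fun c =>
    go n (i + 1) (rem - c)
      (if 0 < c then vec.take i.toNat ++ [c] ++ vec.drop (i.toNat + 1) else vec))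
termination_by (n - i).toNat
decreasing_by omega

def f_alt (n : Int) (r : Int) : List (List Int) := go n 0 r (List.replicate 11 0)

-- ===== PRECONDITION & SPEC =====
-- Pre_ excludes exactly the inputs where A raises: r < 0 (ValueError from
-- combinations_with_replacement) and n ≥ 12 with r ≥ 1 (IndexError on tmp[idx]).
def Pre_f (n : Int) (r : Int) : Prop := 0 ≤ r ∧ (n ≤ 11 ∨ r = 0)
instance (n : Int) (r : Int) : Decidable (Pre_f n r) := by unfold Pre_f; infer_instance
def pvWitness_f : Int × Int := (3, 2)

def Spec_f (n : Int) (r : Int) (out : List (List Int)) : Prop := out = f_alt n r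
instance (n : Int) (r : Int) (out : List (List Int)) : Decidable (Spec_f n r out) := by unfold Spec_f; infer_instance

-- ===== CLAIM (what is proved, stated in full; the proofs are below) =====
def Claim_equal_f : Prop := ∀ (n : Int) (r : Int), Dom_f n r → Pre_f n r → Spec_f n r (f n r)

-- ===== LEMMAS AND PROOFS =====

-- [k, k-1, …, 0], the counts of the head value in the order cwr produces them
def descList : Nat → List Nat
  | 0 => [0]
  | k + 1 => (k + 1) :: descList k

theorem descList_succ (k : Nat) :
    descList (k + 1) = (descList k).map (· + 1) ++ [0] := by
  induction k with
  | zero => rfl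
  | succ k ih =>
    conv_lhs => rw [descList, ih]
    conv_rhs => rw [descList]
    simp

theorem mem_descList {c k : Nat} (h : c ∈ descList k) : c ≤ k := by
  induction k with
  | zero => simp [descList] at h; omega
  | succ k ih => rcases (by simpa [descList] using h : c = k + 1 ∨ c ∈ descList k) with h' | h'
                 · omega
                 · exact Nat.le_succ_of_le (ih h')

theorem pyRange_desc (rem : Int) (h : 0 ≤ rem) :
    PySem.List.pyRange rem (-1) (-1) = (descList rem.toNat).map (fun c : Nat => (c : Int)) := by
  obtain ⟨k, rfl⟩ : ∃ k : Nat, rem = (k : Int) := ⟨rem.toNat, by omega⟩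
  clear h
  induction k with
  | zero =>
    rw [PySem.List.pyRange_neg_one_cons (by norm_num)]
    rw [PySem.List.pyRange_neg_one_eq_nil (by norm_num)]
    rfl
  | succ k ih =>
    rw [PySem.List.pyRange_neg_one_cons (by push_cast; omega)]
    have h1 : ((k + 1 : Nat) : Int) - 1 = (k : Int) := by push_cast; ring
    rw [h1, ih]
    simp [descList]

-- grouping of cwr by the multiplicity of the head element
theorem cwr_cons (x : Int) (ys : List Int) (k : Nat) :
    cwr (x :: ys) k =
      (descList k).flatMap (fun c => (cwr ys (k - c)).map (fun t => List.replicate c x ++ t)) := by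
  induction k with
  | zero => simp [cwr, descList]
  | succ k ih =>
    rw [cwr, ih, descList_succ]
    rw [List.flatMap_append, List.flatMap_map, List.map_flatMap]
    congr 1
    · apply List.flatMap_congr
      intro c _
      rw [List.map_map]
      have h2 : k + 1 - (c + 1) = k - c := by omega
      rw [h2]
      refine List.map_congr_left fun t _ => ?_
      simp [List.replicate_succ]
    · simp

-- folding incAt over c copies of i adds c to entry i
theorem foldl_incAt_replicate (c : Nat) (vec : List Int) (i : Int) (_h0 : 0 ≤ i)
    (h : i.toNat < vec.length) :
    (List.replicate c i).foldl incAt vec = vec.set i.toNat (vec[i.toNat] + c) := by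
  induction c generalizing vec with
  | zero => simp [List.set_getElem_self]
  | succ c ih =>
    rw [List.replicate_succ, List.foldl_cons]
    have hmod : incAt vec i = vec.set i.toNat (vec[i.toNat] + 1) := by
      unfold incAt
      rw [List.modify_eq_set_getElem?]
      simp [List.getElem?_eq_getElem h]
    rw [hmod, ih _ (by simpa using h)]
    rw [List.getElem_set_self (h := by simpa using h), List.set_set]
    congr 1
    push_cast
    ring

theorem go_main_base (n i rem : Int) (vec : List Int) (hni : n ≤ i) (hrem : 0 ≤ rem) :
    go n i rem vec =
      (cwr (PySem.List.pyRange i n 1) rem.toNat).map (fun c => c.foldl incAt vec) := by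
  rw [go, PySem.List.pyRange_one_eq_nil hni]
  by_cases h0 : rem = 0
  · subst h0
    simp [cwr]
  · obtain ⟨k, hk⟩ := Nat.exists_eq_succ_of_ne_zero (show rem.toNat ≠ 0 by omega)
    rw [hk]
    simp [cwr, h0, hni]

theorem go_main (n : Int) (hn : n ≤ 11) :
    ∀ (m : Nat) (i rem : Int) (vec : List Int), (n - i).toNat ≤ m → 0 ≤ i → 0 ≤ rem →
    vec.length = 11 → (∀ j : Nat, (i ≤ (j : Int)) → ((j : Int) < n) → vec.getD j 0 = 0) →
    go n i rem vec =
      (cwr (PySem.List.pyRange i n 1) rem.toNat).map (fun c => c.foldl incAt vec) := by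
  intro m
  induction m with
  | zero =>
    intro i rem vec hm hi hrem hlen hinv
    exact go_main_base n i rem vec (by omega) hrem
  | succ m ih =>
    intro i rem vec hm hi hrem hlen hinv
    by_cases hni : n ≤ i
    · exact go_main_base n i rem vec hni hrem
    · by_cases hrem0 : rem = 0
      · subst hrem0
        rw [go]
        simp [cwr]
      have hilt : i < n := by omega
      have hi11 : i.toNat < 11 := by omega
      rw [go]
      simp only [hrem0, hni, if_false]
      rw [PySem.List.pyRange_one_cons hilt, cwr_cons, List.map_flatMap,
        pyRange_desc rem hrem]
      rw [List.flatMap_map]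
      apply List.flatMap_congr
      intro c hc
      have hcle : c ≤ rem.toNat := mem_descList hc
      have hveci : vec[i.toNat]'(by omega) = 0 := by
        have h5 := hinv i.toNat (by omega) (by omega)
        rwa [List.getD_eq_getElem _ _ (by omega)] at h5
      have hset : (if 0 < (c : Int) then vec.take i.toNat ++ [(c : Int)] ++ vec.drop (i.toNat + 1) else vec)
          = vec.set i.toNat (c : Int) := by
        by_cases hc0 : 0 < (c : Int)
        · rw [if_pos hc0, List.set_eq_take_cons_drop _ (by omega)]
          simp
        · rw [if_neg hc0]
          have hc00 : (c : Int) = 0 := by omega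
          rw [hc00, ← hveci]
          exact (List.set_getElem_self ..).symm
      rw [hset, List.map_map]
      have hrec := ih (i + 1) (rem - (c : Int)) (vec.set i.toNat (c : Int)) (by omega) (by omega)
        (by omega) (by simp [hlen]) (by
          intro j hj1 hj2
          have hji : j ≠ i.toNat := by omega
          rw [List.getD_eq_getElem _ _ (by simp [hlen]; omega),
            List.getElem_set_ne (by omega)]
          have h6 := hinv j (by omega) hj2
          rwa [List.getD_eq_getElem _ _ (by omega)] at h6)
      rw [hrec, show (rem - (c : Int)).toNat = rem.toNat - c by omega]
      congr 1
      funext t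
      simp only [Function.comp]
      rw [List.foldl_append, foldl_incAt_replicate c vec i (by omega) (by omega), hveci, zero_add]

theorem go_zero (n : Int) (i : Int) (vec : List Int) : go n i 0 vec = [vec] := by
  rw [go]
  simp

-- ===== VERDICT (by name: the statement is the Claim_ definition above) =====
theorem f_spec : Claim_equal_f := by
  intro n r _ hpre
  unfold Spec_f f f_alt
  rcases hpre with ⟨hr, hcase⟩
  rcases hcase with hn | hr0
  · exact (go_main n hn (n - 0).toNat 0 r (List.replicate 11 0) le_rfl le_rfl hr
      (by simp) (by intro j _ hj; rw [List.getD_eq_getElem _ _ (by simp; omega)]; simp only [List.getElem_replicate])).symm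
  · subst hr0
    rw [go_zero]
    simp [cwr]
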